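-- pv_equiv track=rewrite | github.com/SeanAdams10/AlgorithmDesign | Q1.3/main.py | better_schedule
-- ===== SOURCE A (Python) =====
-- from typing import List, Tuple, Set
--
-- def better_schedule(set1: Set[int], set2: Set[int]) -> Tuple[List[int], List[int]]:
--     # Can schedule 1 be improved
--     # Make copies of the sets so we don't modify the originals
--     working_set1 = set1.copy()
--     working_set2 = set2.copy()
--
--     schedule1: List[int] = []
--     schedule2: List[int] = []
--
--     while len(working_set1) > 0 and len(working_set2) > 0:
--         if max(working_set1) > max(working_set2):
--             max_val1 = max(working_set1)
--             working_set1.remove(max_val1)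
--             schedule1.append(max_val1)
--             min_val2 = min(working_set2)
--             working_set2.remove(min_val2)
--             schedule2.append(min_val2)
--         else:
--             max_val2 = max(working_set2)
--             working_set2.remove(max_val2)
--             schedule2.append(max_val2)
--             min_val1 = min(working_set1)
--             working_set1.remove(min_val1)
--             schedule1.append(min_val1)
--
--     return schedule1, schedule2
-- ===== SOURCE B (Python) =====
-- def better_schedule(set1, set2):
--     # Sort both sets once, then consume them with front/back two-pointers:
--     # the max of a remaining set is at the back pointer, the min at the front.
--     s1 = sorted(set1)
--     s2 = sorted(set2)
--     i1, j1 = 0, len(s1) - 1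
--     i2, j2 = 0, len(s2) - 1
--     schedule1 = []
--     schedule2 = []
--     while i1 <= j1 and i2 <= j2:
--         if s1[j1] > s2[j2]:
--             schedule1.append(s1[j1])
--             j1 -= 1
--             schedule2.append(s2[i2])
--             i2 += 1
--         else:
--             schedule2.append(s2[j2])
--             j2 -= 1
--             schedule1.append(s1[i1])
--             i1 += 1
--     return schedule1, schedule2
-- ===== Notes on version B (the rewrite author's own statement) =====
-- stated objective: faster
-- what changed: A rescans the working sets for max/min and removes elements one by one each iteration (O(n) work per step); B sorts both sets once and then walks them with front/back two-pointers, so each step is O(1).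
import Mathlib
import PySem

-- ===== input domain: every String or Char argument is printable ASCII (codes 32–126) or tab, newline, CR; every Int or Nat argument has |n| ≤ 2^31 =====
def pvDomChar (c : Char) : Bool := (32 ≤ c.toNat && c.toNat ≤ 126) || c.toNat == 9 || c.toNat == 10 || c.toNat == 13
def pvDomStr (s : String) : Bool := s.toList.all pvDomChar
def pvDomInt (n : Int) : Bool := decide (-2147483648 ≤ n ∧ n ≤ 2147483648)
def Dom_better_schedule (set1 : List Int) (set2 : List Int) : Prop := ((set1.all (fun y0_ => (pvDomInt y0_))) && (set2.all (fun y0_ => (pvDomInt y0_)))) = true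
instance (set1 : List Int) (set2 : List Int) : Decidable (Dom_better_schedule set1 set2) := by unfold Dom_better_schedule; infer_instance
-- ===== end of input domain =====

-- B sorts each set once and then walks it with front/back two-pointers, where A rescans the
-- working sets for max/min every iteration; equality of the RETURN values is proved for all inputs.

-- ===== PORT A =====
-- A's while loop: each iteration removes the overall max from one working set
-- (Python's max/min over a set = a running max/min scan, ported as foldl) and the min from the other.
def pvGoA : List Int → List Int → List Int × List Int
  | [], _ => ([], [])
  | _ :: _, [] => ([], [])
  | a :: s, b :: t =>
    let M1 := s.foldl max a          -- max(working_set1)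
    let M2 := t.foldl max b          -- max(working_set2)
    if M1 > M2 then
      let m2 := t.foldl min b        -- min(working_set2)
      let r := pvGoA ((a :: s).erase M1) ((b :: t).erase m2)
      (M1 :: r.1, m2 :: r.2)
    else
      let m1 := s.foldl min a        -- min(working_set1)
      let r := pvGoA ((a :: s).erase m1) ((b :: t).erase M2)
      (m1 :: r.1, M2 :: r.2)
  termination_by s t => s.length + t.length
  decreasing_by
    · have h1 : s.foldl max a ∈ a :: s := List.max?_mem rfl
      have h2 : t.foldl min b ∈ b :: t := List.min?_mem rfl
      simp [List.length_erase_of_mem h1, List.length_erase_of_mem h2]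
      omega
    · have h1 : s.foldl min a ∈ a :: s := List.min?_mem rfl
      have h2 : t.foldl max b ∈ b :: t := List.max?_mem rfl
      simp [List.length_erase_of_mem h1, List.length_erase_of_mem h2]
      omega

def better_schedule (set1 : List Int) (set2 : List Int) : List Int × List Int :=
  pvGoA set1 set2

-- ===== PORT B =====
-- B's two-pointer while loop: the index window s[i..j] is the remaining segment of the sorted
-- list, consumed at the back (s[j], j -= 1 → getLastD/dropLast) or front (s[i], i += 1 → head/tail);
-- the default of getLastD is never used (the window is nonempty).
def pvGoB : List Int → List Int → List Int × List Int
  | [], _ => ([], [])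
  | _ :: _, [] => ([], [])
  | a :: s, b :: t =>
    let M1 := (a :: s).getLastD 0    -- s1[j1]
    let M2 := (b :: t).getLastD 0    -- s2[j2]
    if M1 > M2 then
      let r := pvGoB (a :: s).dropLast t
      (M1 :: r.1, b :: r.2)
    else
      let r := pvGoB s (b :: t).dropLast
      (a :: r.1, M2 :: r.2)
  termination_by s t => s.length + t.length
  decreasing_by
    · simp; omega
    · simp; omega

def better_schedule_alt (set1 : List Int) (set2 : List Int) : List Int × List Int :=
  pvGoB (PySem.List.sorted set1 (fun x => x) false) (PySem.List.sorted set2 (fun x => x) false)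

-- ===== PRECONDITION & SPEC =====
def Spec_better_schedule (set1 : List Int) (set2 : List Int) (out : List Int × List Int) : Prop := out = better_schedule_alt set1 set2
instance (set1 : List Int) (set2 : List Int) (out : List Int × List Int) : Decidable (Spec_better_schedule set1 set2 out) := by unfold Spec_better_schedule; infer_instance

-- ===== CLAIM (what is proved, stated in full; the proofs are below) =====
def Claim_equal_better_schedule : Prop := ∀ (set1 : List Int) (set2 : List Int), Dom_better_schedule set1 set2 → Spec_better_schedule set1 set2 (better_schedule set1 set2)

-- ===== LEMMAS AND PROOFS =====

theorem pvGetLastDMem (a : Int) (t : List Int) : (a :: t).getLastD 0 ∈ a :: t := by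
  rw [show (a :: t).getLastD 0 = (a :: t).getLast (by simp) from rfl]
  exact List.getLast_mem _

-- the last element of a (·≤·)-pairwise list bounds every element
theorem pvLeGetLastD : ∀ (l : List Int), l.Pairwise (· ≤ ·) →
    ∀ x ∈ l, x ≤ l.getLastD 0 := by
  intro l
  induction l with
  | nil => simp
  | cons a t ih =>
    intro hp x hx
    obtain ⟨ha, hpt⟩ := List.pairwise_cons.mp hp
    cases t with
    | nil => simp at hx; simp [hx]
    | cons b u =>
      rcases List.mem_cons.mp hx with rfl | hx'
      · exact ha _ (pvGetLastDMem b u)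
      · exact ih hpt x hx'

theorem pvDropLastAppend (a : Int) (t : List Int) :
    (a :: t).dropLast ++ [(a :: t).getLastD 0] = a :: t := by
  rw [show (a :: t).getLastD 0 = (a :: t).getLast (by simp) from rfl]
  exact List.dropLast_append_getLast (by simp)

-- A's greedy on a multiset = B's two-pointer walk over any sorted arrangement of it
theorem pvMain : ∀ (n : Nat) (s t l m : List Int), s.length + t.length ≤ n →
    s.Perm l → t.Perm m → l.Pairwise (· ≤ ·) → m.Pairwise (· ≤ ·) →
    pvGoA s t = pvGoB l m := by
  intro n
  induction n with
  | zero =>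
    intro s t l m hn hsl htm _ _
    have hs : s = [] := by cases s <;> simp_all
    have ht : t = [] := by cases t <;> simp_all
    subst hs ht
    have hl : l = [] := hsl.symm.eq_nil
    have hm : m = [] := htm.symm.eq_nil
    subst hl hm; simp [pvGoA, pvGoB]
  | succ n ih =>
    intro s t l m hn hsl htm hpl hpm
    cases s with
    | nil =>
      have hl : l = [] := hsl.symm.eq_nil
      subst hl
      cases t with
      | nil => have hm : m = [] := htm.symm.eq_nil; subst hm; simp [pvGoA, pvGoB]
      | cons b t' =>
        have hm : m ≠ [] := by intro h; subst h; simpa using htm.length_eq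
        obtain ⟨d, m', rfl⟩ := List.exists_cons_of_ne_nil hm
        simp [pvGoA, pvGoB]
    | cons a s' =>
      have hl : l ≠ [] := by intro h; subst h; simpa using hsl.length_eq
      obtain ⟨c, l', rfl⟩ := List.exists_cons_of_ne_nil hl
      cases t with
      | nil =>
        have hm : m = [] := htm.symm.eq_nil
        subst hm; simp [pvGoA, pvGoB]
      | cons b t' =>
        have hm : m ≠ [] := by intro h; subst h; simpa using htm.length_eq
        obtain ⟨d, m', rfl⟩ := List.exists_cons_of_ne_nil hm
        -- the four extremal values coincide pair by pair
        have hM1 : s'.foldl max a = (c :: l').getLastD 0 := by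
          apply le_antisymm
          · exact pvLeGetLastD _ hpl _ (hsl.mem_iff.mp (List.max?_mem rfl))
          · have hmem : (c :: l').getLastD 0 ∈ a :: s' :=
              hsl.symm.mem_iff.mp (pvGetLastDMem c l')
            rcases List.mem_cons.mp hmem with h | h
            · exact h.trans_le (PySem.List.le_foldl_max s' a).1
            · exact (PySem.List.le_foldl_max s' a).2 _ h
        have hM2 : t'.foldl max b = (d :: m').getLastD 0 := by
          apply le_antisymm
          · exact pvLeGetLastD _ hpm _ (htm.mem_iff.mp (List.max?_mem rfl))
          · have hmem : (d :: m').getLastD 0 ∈ b :: t' :=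
              htm.symm.mem_iff.mp (pvGetLastDMem d m')
            rcases List.mem_cons.mp hmem with h | h
            · exact h.trans_le (PySem.List.le_foldl_max t' b).1
            · exact (PySem.List.le_foldl_max t' b).2 _ h
        have hm1 : s'.foldl min a = c := by
          apply le_antisymm
          · exact PySem.List.min?_isMin (PySem.List.min?_id_cons a s')
              _ (hsl.symm.mem_iff.mp (by simp))
          · have hmem : s'.foldl min a ∈ c :: l' := hsl.mem_iff.mp (List.min?_mem rfl)
            obtain ⟨hc, _⟩ := List.pairwise_cons.mp hpl
            rcases List.mem_cons.mp hmem with h | h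
            · exact le_of_eq h.symm
            · exact hc _ h
        have hm2 : t'.foldl min b = d := by
          apply le_antisymm
          · exact PySem.List.min?_isMin (PySem.List.min?_id_cons b t')
              _ (htm.symm.mem_iff.mp (by simp))
          · have hmem : t'.foldl min b ∈ d :: m' := htm.mem_iff.mp (List.min?_mem rfl)
            obtain ⟨hd, _⟩ := List.pairwise_cons.mp hpm
            rcases List.mem_cons.mp hmem with h | h
            · exact le_of_eq h.symm
            · exact hd _ h
        -- removing the max = dropping the last of the sorted arrangement
        have hpermMax1 : ((a :: s').erase ((c :: l').getLastD 0)).Perm (c :: l').dropLast := by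
          have h3 : (c :: l').Perm ((c :: l').getLastD 0 :: (c :: l').dropLast) := by
            conv_lhs => rw [← pvDropLastAppend c l']
            exact List.perm_append_singleton _ _
          have h4 := (hsl.trans h3).erase ((c :: l').getLastD 0)
          rwa [List.erase_cons_head] at h4
        have hpermMax2 : ((b :: t').erase ((d :: m').getLastD 0)).Perm (d :: m').dropLast := by
          have h3 : (d :: m').Perm ((d :: m').getLastD 0 :: (d :: m').dropLast) := by
            conv_lhs => rw [← pvDropLastAppend d m']
            exact List.perm_append_singleton _ _
          have h4 := (htm.trans h3).erase ((d :: m').getLastD 0)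
          rwa [List.erase_cons_head] at h4
        -- removing the min = dropping the head of the sorted arrangement
        have hpermMin1 : ((a :: s').erase c).Perm l' := by
          have h4 := hsl.erase c
          rwa [List.erase_cons_head] at h4
        have hpermMin2 : ((b :: t').erase d).Perm m' := by
          have h4 := htm.erase d
          rwa [List.erase_cons_head] at h4
        -- sortedness is inherited by tails and dropLast
        have hplD : (c :: l').dropLast.Pairwise (· ≤ ·) := hpl.sublist (List.dropLast_sublist _)
        have hpmD : (d :: m').dropLast.Pairwise (· ≤ ·) := hpm.sublist (List.dropLast_sublist _)
        have hplT : l'.Pairwise (· ≤ ·) := (List.pairwise_cons.mp hpl).2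
        have hpmT : m'.Pairwise (· ≤ ·) := (List.pairwise_cons.mp hpm).2
        -- length bookkeeping for the induction hypothesis
        have hlen1 : ((a :: s').erase ((c :: l').getLastD 0)).length = s'.length := by
          rw [List.length_erase_of_mem (hsl.symm.mem_iff.mp (pvGetLastDMem c l'))]; rfl
        have hlen2 : ((b :: t').erase d).length = t'.length := by
          rw [List.length_erase_of_mem (htm.symm.mem_iff.mp (by simp))]; rfl
        have hlen3 : ((a :: s').erase c).length = s'.length := by
          rw [List.length_erase_of_mem (hsl.symm.mem_iff.mp (by simp))]; rfl
        have hlen4 : ((b :: t').erase ((d :: m').getLastD 0)).length = t'.length := by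
          rw [List.length_erase_of_mem (htm.symm.mem_iff.mp (pvGetLastDMem d m'))]; rfl
        have hn' : s'.length + t'.length + 2 ≤ n + 1 := by
          simp only [List.length_cons] at hn; omega
        rw [pvGoA, pvGoB]
        rw [hM1, hM2, hm1, hm2]
        split_ifs with hgt
        · have hrec := ih _ _ _ _ (by rw [hlen1, hlen2]; omega) hpermMax1 hpermMin2 hplD hpmT
          simp only [hrec]
        · have hrec := ih _ _ _ _ (by rw [hlen3, hlen4]; omega) hpermMin1 hpermMax2 hplT hpmD
          simp only [hrec]

-- ===== VERDICT (by name: the statement is the Claim_ definition above) =====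
theorem better_schedule_spec : Claim_equal_better_schedule := by
  intro s t _
  unfold Spec_better_schedule better_schedule better_schedule_alt
  apply pvMain (s.length + t.length) _ _ _ _ le_rfl
    (PySem.List.sorted_perm s (fun x => x) false).symm
    (PySem.List.sorted_perm t (fun x => x) false).symm
  · exact PySem.List.sorted_pairwise s (fun x => x)
  · exact PySem.List.sorted_pairwise t (fun x => x)
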